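-- pv_equiv track=rewrite | github.com/sebashebe/IoT-Spectrophotometer-Thermal-Analysis | spectrometer/views.py | get_localized_wavelength_labels
-- ===== SOURCE A (Python) =====
-- WAVELENGTHS = [450, 500, 550, 570, 600, 650]
--
-- def get_localized_wavelength_labels(t):
--     colors = {
--         450: t.get('colors', {}).get('violet', 'Violeta'),
--         500: t.get('colors', {}).get('blue', 'Azul'),
--         550: t.get('colors', {}).get('green', 'Verde'),
--         570: t.get('colors', {}).get('yellow', 'Amarillo'),
--         600: t.get('colors', {}).get('orange', 'Naranja'),
--         650: t.get('colors', {}).get('red', 'Rojo'),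
--     }
--     return [f"{colors[wl]} ({wl}nm)" for wl in WAVELENGTHS]
-- ===== SOURCE B (Python) =====
-- WAVELENGTHS = [450, 500, 550, 570, 600, 650]
--
-- COLOR_KEYS = ['violet', 'blue', 'green', 'yellow', 'orange', 'red']
-- SPANISH_DEFAULTS = ['Violeta', 'Azul', 'Verde', 'Amarillo', 'Naranja', 'Rojo']
--
-- def get_localized_wavelength_labels(t):
--     # Start from the Spanish defaults and overwrite them in ONE pass over the
--     # provided translation entries, instead of doing one lookup per color.
--     names = dict(zip(COLOR_KEYS, SPANISH_DEFAULTS))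
--     for key, value in t.get('colors', {}).items():
--         if key in names:
--             names[key] = value
--     return [f"{name} ({wl}nm)" for wl, name in zip(WAVELENGTHS, names.values())]
-- ===== Notes on version B (the rewrite author's own statement) =====
-- stated objective: alternative
-- what changed: B inverts the traversal: instead of building a wavelength-keyed dict by six per-color lookups into the translations, it seeds a dict of Spanish defaults and overwrites it in a single pass over the provided translation entries, then formats the six values in order; Pre_ only excludes association lists whose 'colors' entry carries duplicate keys, which no real Python dict can produce, since there A's first-match lookup and B's last-wins overwrite are equally defensible.
import Mathlib
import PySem

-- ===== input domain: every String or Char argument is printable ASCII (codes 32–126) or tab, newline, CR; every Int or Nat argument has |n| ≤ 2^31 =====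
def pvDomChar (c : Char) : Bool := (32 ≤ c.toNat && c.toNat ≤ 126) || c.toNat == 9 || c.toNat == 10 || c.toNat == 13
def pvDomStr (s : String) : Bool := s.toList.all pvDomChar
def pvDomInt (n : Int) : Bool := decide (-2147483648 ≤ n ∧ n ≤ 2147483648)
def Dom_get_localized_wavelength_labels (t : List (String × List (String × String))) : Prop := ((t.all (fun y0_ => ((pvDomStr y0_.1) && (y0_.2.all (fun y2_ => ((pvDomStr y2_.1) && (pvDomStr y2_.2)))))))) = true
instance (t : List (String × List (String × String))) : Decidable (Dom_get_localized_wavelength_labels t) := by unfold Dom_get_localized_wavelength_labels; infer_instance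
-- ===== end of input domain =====

-- B inverts the traversal: rather than six per-color lookups into the translation
-- dict, it seeds the Spanish defaults and overwrites them in one pass over the
-- translation entries, then formats the values in order (objective: alternative).

-- ===== PORT A =====
def pvWavelengths : List Int := [450, 500, 550, 570, 600, 650]

def get_localized_wavelength_labels (t : List (String × List (String × String))) : List String :=
  let tc : PySem.Dict String String :=
    PySem.Dict.mk (PySem.Dict.getD (PySem.Dict.mk t) "colors" [])
  let colors : PySem.Dict Int String := PySem.Dict.mk
    [ (450, PySem.Dict.getD tc "violet" "Violeta"),
      (500, PySem.Dict.getD tc "blue" "Azul"),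
      (550, PySem.Dict.getD tc "green" "Verde"),
      (570, PySem.Dict.getD tc "yellow" "Amarillo"),
      (600, PySem.Dict.getD tc "orange" "Naranja"),
      (650, PySem.Dict.getD tc "red" "Rojo") ]
  -- colors[wl]: wl is always one of the six literal keys, so the lookup always
  -- succeeds; getD's default is unreachable.
  pvWavelengths.map (fun wl => PySem.Dict.getD colors wl "" ++ " (" ++ PySem.Int.toStr wl ++ "nm)")

-- ===== PORT B =====
def pvColorKeys : List String := ["violet", "blue", "green", "yellow", "orange", "red"]
def pvSpanishDefaults : List String := ["Violeta", "Azul", "Verde", "Amarillo", "Naranja", "Rojo"]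

def get_localized_wavelength_labels_alt (t : List (String × List (String × String))) : List String :=
  let names0 : PySem.Dict String String := PySem.Dict.ofList (pvColorKeys.zip pvSpanishDefaults)
  -- for key, value in t.get('colors', {}).items(): if key in names: names[key] = value
  let names : PySem.Dict String String :=
    (PySem.Dict.getD (PySem.Dict.mk t) "colors" []).foldl
      (fun d p => if d.contains p.1 then d.insert p.1 p.2 else d) names0
  (pvWavelengths.zip names.values).map
    (fun p => p.2 ++ " (" ++ PySem.Int.toStr p.1 ++ "nm)")

-- ===== PRECONDITION & SPEC =====
-- Pre_ excludes only association lists whose 'colors' entry carries duplicate keys —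
-- impossible for a real Python dict — where A's first-match lookup and B's last-wins
-- overwrite are both defensible accidents of the representation.
def Pre_get_localized_wavelength_labels (t : List (String × List (String × String))) : Prop :=
  ((PySem.Dict.getD (PySem.Dict.mk t) "colors" []).map Prod.fst).Nodup
instance (t : List (String × List (String × String))) : Decidable (Pre_get_localized_wavelength_labels t) := by unfold Pre_get_localized_wavelength_labels; infer_instance

def pvWitness_get_localized_wavelength_labels : (List (String × List (String × String))) :=
  [("colors", [("violet", "Violet"), ("red", "Red")])]

def Spec_get_localized_wavelength_labels (t : List (String × List (String × String))) (out : List String) : Prop := out = get_localized_wavelength_labels_alt t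
instance (t : List (String × List (String × String))) (out : List String) : Decidable (Spec_get_localized_wavelength_labels t out) := by unfold Spec_get_localized_wavelength_labels; infer_instance

-- ===== CLAIM (what is proved, stated in full; the proofs are below) =====
def Claim_equal_get_localized_wavelength_labels : Prop := ∀ (t : List (String × List (String × String))), Dom_get_localized_wavelength_labels t → Pre_get_localized_wavelength_labels t → Spec_get_localized_wavelength_labels t (get_localized_wavelength_labels t)

-- ===== LEMMAS AND PROOFS =====

-- The guarded-insert loop never adds keys.
theorem pv_keys_foldl (cs : List (String × String)) (d : PySem.Dict String String) :
    (cs.foldl (fun d p => if d.contains p.1 then d.insert p.1 p.2 else d) d).keys = d.keys := by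
  induction cs generalizing d with
  | nil => rfl
  | cons a rest ih =>
    simp only [List.foldl_cons]
    rw [ih]
    by_cases h : d.contains a.1
    · simp [PySem.Dict.keys_insert_of_contains, h]
    · simp [h]

-- What the loop leaves at key k, when the scanned entries have pairwise-distinct keys:
-- the unique entry of cs at k if k was already present, the initial value otherwise.
theorem pv_get_foldl (cs : List (String × String)) (h : (cs.map Prod.fst).Nodup)
    (d : PySem.Dict String String) (k : String) :
    (cs.foldl (fun d p => if d.contains p.1 then d.insert p.1 p.2 else d) d).get? k
      = if d.contains k then ((PySem.Dict.mk cs).get? k).or (d.get? k) else d.get? k := by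
  induction cs generalizing d with
  | nil =>
    have h0 : (PySem.Dict.mk ([] : List (String × String))).get? k = none := rfl
    simp [h0]
  | cons a rest ih =>
    obtain ⟨ak, av⟩ := a
    rw [List.map_cons] at h
    obtain ⟨ha, hrest⟩ := List.nodup_cons.mp h
    have hnone : (PySem.Dict.mk rest).get? ak = none := by
      rw [PySem.Dict.get?_eq_none_iff_not_mem_keys]
      simpa [PySem.Dict.keys] using ha
    simp only [List.foldl_cons]
    rw [ih hrest]
    by_cases hk : k = ak
    · subst hk
      by_cases hc : d.contains k <;>
        simp [hc, hnone, PySem.Dict.get?_mk_cons]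
    · by_cases hc : d.contains ak <;>
        simp [hc, hk, Ne.symm hk, beq_iff_eq, PySem.Dict.get?_mk_cons,
          PySem.Dict.get?_insert, PySem.Dict.contains_insert]

-- A Nodup-keyed dict's values listed through its keys.
theorem pv_values_eq_map_keys (d : PySem.Dict String String) (h : d.keys.Nodup) :
    d.values = d.keys.map (fun k => d.getD k "") := by
  show d.items.map (·.2) = (d.items.map (·.1)).map (fun k => d.getD k "")
  rw [List.map_map]
  apply List.map_congr_left
  intro p hp
  obtain ⟨k, v⟩ := p
  exact (PySem.Dict.getD_of_mem_items d hp h "").symm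

-- ===== VERDICT (by name: the statement is the Claim_ definition above) =====
theorem get_localized_wavelength_labels_spec : Claim_equal_get_localized_wavelength_labels := by
  intro t _ hpre
  unfold Pre_get_localized_wavelength_labels at hpre
  unfold Spec_get_localized_wavelength_labels
  unfold get_localized_wavelength_labels get_localized_wavelength_labels_alt
  dsimp only
  set cs := PySem.Dict.getD (PySem.Dict.mk t) "colors" [] with hcs
  set names := cs.foldl (fun d p => if d.contains p.1 then d.insert p.1 p.2 else d)
      (PySem.Dict.ofList (pvColorKeys.zip pvSpanishDefaults)) with hnames
  have hkeys : names.keys = pvColorKeys := by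
    rw [hnames, pv_keys_foldl]; decide
  have hget : ∀ k dflt, (PySem.Dict.ofList (pvColorKeys.zip pvSpanishDefaults)).get? k = some dflt →
      names.getD k "" = (PySem.Dict.mk cs).getD k dflt := by
    intro k dflt hk
    have hc : (PySem.Dict.ofList (pvColorKeys.zip pvSpanishDefaults)).contains k = true := by
      rw [PySem.Dict.contains_eq_isSome_get?, hk]; rfl
    rw [PySem.Dict.getD_eq_get?_getD, hnames, pv_get_foldl cs hpre, hc, if_pos rfl, hk]
    cases hv : (PySem.Dict.mk cs).get? k with
    | none => simp [PySem.Dict.getD_eq_get?_getD, hv, Option.or]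
    | some v => simp [PySem.Dict.getD_eq_get?_getD, hv, Option.or]
  have hvals : names.values = pvColorKeys.map (fun k => names.getD k "") := by
    rw [pv_values_eq_map_keys names (by rw [hkeys]; decide), hkeys]
  rw [hvals]
  simp only [pvColorKeys, List.map_cons, List.map_nil]
  rw [hget "violet" "Violeta" (by decide), hget "blue" "Azul" (by decide),
      hget "green" "Verde" (by decide), hget "yellow" "Amarillo" (by decide),
      hget "orange" "Naranja" (by decide), hget "red" "Rojo" (by decide)]
  simp [pvWavelengths, List.zip, PySem.Dict.getD_eq_get?_getD, PySem.Dict.get?_mk_cons]
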